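-- pv_equiv track=rewrite | github.com/MatroidsAndPatroids/Advent-Of-Code | 2015 Python/1503.py | createPresentMap
-- ===== SOURCE A (Python) =====
-- from collections import defaultdict
--
-- def createPresentMap(instructionString, numPlayers):
--
-- 	# position (x, y) is converted to 1000000 * x + y
-- 	rowOffset = 1000000
-- 	floorIncrement = {
-- 		'>' : 1,
-- 		'<' : -1,
-- 		'v' : rowOffset,
-- 		'^' : -rowOffset}
--
-- 	currentLocation = [0] * numPlayers # starting position is 0 for each player
-- 	numPresents = defaultdict(int)
-- 	numPresents[0] = numPlayers # starting position already has #players presents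
-- 	turn = 0 # 0 = Santa's turn, 1 = Robo-Santa's
--
-- 	for index, character in enumerate(instructionString):
-- 		increment = floorIncrement.get(character, 0)
-- 		if increment != 0:
-- 			currentLocation[turn] += increment
-- 			numPresents[currentLocation[turn]] += 1
-- 			turn = (turn + 1) % numPlayers
--
-- 	return numPresents
-- ===== SOURCE B (Python) =====
-- from collections import defaultdict
--
-- def createPresentMap(instructionString, numPlayers):
--     rowOffset = 1000000
--     increments = {'>': 1, '<': -1, 'v': rowOffset, '^': -rowOffset}
--     moves = [increments[c] for c in instructionString if c in increments]
--     # deal the moves round-robin: player p gets moves p, p+n, p+2n, ...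
--     # and walks them with a running cumulative sum starting at 0
--     tracks = []
--     for p in range(numPlayers):
--         track = []
--         pos = 0
--         i = p
--         while i < len(moves):
--             pos += moves[i]
--             track.append(pos)
--             i += numPlayers
--         tracks.append(track)
--     counts = defaultdict(int)
--     counts[0] = numPlayers
--     for i in range(len(moves)):
--         counts[tracks[i % numPlayers][i // numPlayers]] += 1
--     return counts
-- ===== Notes on version B (the rewrite author's own statement) =====
-- stated objective: alternative
-- what changed: Instead of simulating the interleaved walk with a mutable per-player position array, a turn counter and in-place dict updates, B filters the moves, deals them round-robin into per-player cumulative-sum tracks and then counts the landing positions tracks[i % n][i // n] in a separate pass.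
import Mathlib
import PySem

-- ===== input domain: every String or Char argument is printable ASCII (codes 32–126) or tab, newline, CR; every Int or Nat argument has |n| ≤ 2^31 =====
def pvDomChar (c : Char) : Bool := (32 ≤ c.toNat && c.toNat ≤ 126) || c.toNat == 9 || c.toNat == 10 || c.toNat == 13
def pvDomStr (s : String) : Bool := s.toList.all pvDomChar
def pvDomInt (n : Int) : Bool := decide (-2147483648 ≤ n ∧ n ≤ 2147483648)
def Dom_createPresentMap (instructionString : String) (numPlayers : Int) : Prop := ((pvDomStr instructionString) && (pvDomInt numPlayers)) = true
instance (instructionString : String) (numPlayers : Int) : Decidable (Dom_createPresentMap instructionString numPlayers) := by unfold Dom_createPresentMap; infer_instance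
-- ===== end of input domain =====

-- B re-decomposes the same counting: it filters the moves, deals them round-robin into
-- per-player cumulative-sum tracks, then counts the landing positions (alternative
-- decomposition, same cost; equivalence proved on Pre_, i.e. wherever A returns).


-- ===== PORT A =====
-- the literal dict {'>':1,'<':-1,'v':rowOffset,'^':-rowOffset}
def pvIncDict : PySem.Dict Char Int :=
  PySem.Dict.ofList [('>', 1), ('<', -1), ('v', 1000000), ('^', -1000000)]

-- one iteration of A's for-loop body; state = (currentLocation, numPresents, turn)
def pvStepA (numPlayers : Int) (st : List Int × PySem.Dict Int Int × Int) (c : Char) :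
    List Int × PySem.Dict Int Int × Int :=
  let increment := pvIncDict.getD c 0
  if increment ≠ 0 then
    let newLoc := PySem.List.pyGetD st.1 st.2.2 0 + increment   -- currentLocation[turn] + increment
    (PySem.List.pySetD st.1 st.2.2 newLoc,                      -- currentLocation[turn] = …  (in range on Pre_)
     (st.2.1).modify newLoc 0 (· + 1),                          -- numPresents[…] += 1
     PySem.Int.mod (st.2.2 + 1) numPlayers)                     -- turn = (turn + 1) % numPlayers
  else st

def createPresentMap (instructionString : String) (numPlayers : Int) : List (Int × Int) :=
  let currentLocation : List Int := PySem.List.pyRepeat [0] numPlayers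
  let numPresents : PySem.Dict Int Int := PySem.Dict.insert PySem.Dict.empty 0 numPlayers
  let final := (PySem.List.enumerate instructionString.toList 0).foldl
    (fun st p => pvStepA numPlayers st p.2) (currentLocation, numPresents, 0)
  final.2.1.items

-- ===== PORT B =====
-- B's own copy of the increments dict literal (Source B defines its own)
def pvIncDictB : PySem.Dict Char Int :=
  PySem.Dict.ofList [('>', 1), ('<', -1), ('v', 1000000), ('^', -1000000)]

-- the while-loop 'while i < len(moves): pos += moves[i]; track.append(pos); i += numPlayers';
-- fuel = len(moves) only makes the recursion total (step ≥ 1 on Pre_ does ≤ len iterations)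
def pvCumWalk (moves : List Int) (step : Int) : Int → Int → Nat → List Int
  | _, _, 0 => []
  | pos, i, fuel + 1 =>
    if i < (moves.length : Int) then
      let pos' := pos + PySem.List.pyGetD moves i 0
      pos' :: pvCumWalk moves step pos' (i + step) fuel
    else []

def createPresentMap_alt (instructionString : String) (numPlayers : Int) : List (Int × Int) :=
  let moves : List Int :=
    (instructionString.toList.filter (fun c => pvIncDictB.contains c)).map
      (fun c => (pvIncDictB.get? c).getD 0)
  let tracks : List (List Int) :=
    (PySem.List.pyRange 0 numPlayers 1).foldl
      (fun acc p => acc ++ [pvCumWalk moves numPlayers 0 p moves.length]) []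
  let counts0 : PySem.Dict Int Int := PySem.Dict.insert PySem.Dict.empty 0 numPlayers
  let counts := (PySem.List.pyRange 0 (moves.length : Int) 1).foldl
    (fun d i =>
      d.modify
        (PySem.List.pyGetD
          (PySem.List.pyGetD tracks (PySem.Int.mod i numPlayers) [])
          (PySem.Int.floordiv i numPlayers) 0)
        0 (· + 1))
    counts0
  counts.items

-- ===== PRECONDITION & SPEC =====
-- Pre_ excludes exactly the inputs on which A raises IndexError: numPlayers < 1 while the
-- string still contains a move character ('>', '<', 'v' or '^').
def Pre_createPresentMap (instructionString : String) (numPlayers : Int) : Prop :=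
  1 ≤ numPlayers ∨ ∀ c ∈ instructionString.toList, c ≠ '>' ∧ c ≠ '<' ∧ c ≠ 'v' ∧ c ≠ '^'
instance (instructionString : String) (numPlayers : Int) : Decidable (Pre_createPresentMap instructionString numPlayers) := by unfold Pre_createPresentMap; infer_instance

def pvWitness_createPresentMap : String × Int := ("^>v<>a<", 2)

def Spec_createPresentMap (instructionString : String) (numPlayers : Int) (out : List (Int × Int)) : Prop := out = createPresentMap_alt instructionString numPlayers
instance (instructionString : String) (numPlayers : Int) (out : List (Int × Int)) : Decidable (Spec_createPresentMap instructionString numPlayers out) := by unfold Spec_createPresentMap; infer_instance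

-- ===== CLAIM (what is proved, stated in full; the proofs are below) =====
def Claim_equal_createPresentMap : Prop := ∀ (instructionString : String) (numPlayers : Int), Dom_createPresentMap instructionString numPlayers → Pre_createPresentMap instructionString numPlayers → Spec_createPresentMap instructionString numPlayers (createPresentMap instructionString numPlayers)

-- ===== LEMMAS AND PROOFS =====
def pvClassSum (ms : List Int) (n' : Nat) (i : Nat) : Int :=
  if i < n' ∨ n' = 0 then (if i < n' then ms.getD i 0 else 0)
  else pvClassSum ms n' (i - n') + ms.getD i 0
termination_by i
decreasing_by omega
lemma pvClassSum_lt {ms : List Int} {n' i : Nat} (h : i < n') :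
    pvClassSum ms n' i = ms.getD i 0 := by
  rw [pvClassSum]; simp [h]
lemma pvClassSum_ge {ms : List Int} {n' i : Nat} (h1 : 1 ≤ n') (h2 : n' ≤ i) :
    pvClassSum ms n' i = pvClassSum ms n' (i - n') + ms.getD i 0 := by
  rw [pvClassSum]; rw [if_neg (by omega)]

lemma pvClassSum_cons {n' : Nat} (h1 : 1 ≤ n') (m : Int) (ms : List Int) (i : Nat) :
    pvClassSum (m :: ms) n' (i + 1) =
      (if (i + 1) % n' = 0 then m else 0) + pvClassSum ms n' i := by
  induction i using Nat.strong_induction_on with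
  | _ i ih =>
    by_cases hlt : i + 1 < n'
    · rw [pvClassSum_lt hlt, pvClassSum_lt (by omega)]
      have : ¬ (i + 1) % n' = 0 := by
        rw [Nat.mod_eq_of_lt hlt]; omega
      simp [this]
    · by_cases heq : i + 1 = n'
      · rw [pvClassSum_ge h1 (by omega)]
        have h2 : i + 1 - n' = 0 := by omega
        rw [h2, pvClassSum_lt (by omega), pvClassSum_lt (show i < n' by omega)]
        have : (i + 1) % n' = 0 := by rw [heq]; simp
        simp [this]
      · -- i + 1 > n'
        have hgt : n' < i + 1 := by omega
        rw [pvClassSum_ge h1 (by omega)]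
        have h2 : i + 1 - n' = (i - n') + 1 := by omega
        rw [h2, ih (i - n') (by omega)]
        conv_rhs => rw [pvClassSum_ge (ms := ms) h1 (show n' ≤ i by omega)]
        have h3 : (i - n' + 1) % n' = (i + 1) % n' := by
          conv_rhs => rw [show i + 1 = (i - n' + 1) + n' by omega]
          simp [Nat.add_mod_right]
        rw [h3]
        simp
        ring

def pvAland (n' : Nat) : List Int → List Int → Nat → List Int
  | [], _, _ => []
  | m :: ms, locs, t =>
    (locs.getD t 0 + m) :: pvAland n' ms (locs.set t (locs.getD t 0 + m)) ((t + 1) % n')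

lemma pvAland_eq {n' : Nat} (h1 : 1 ≤ n') :
    ∀ (ms locs : List Int) (t : Nat), locs.length = n' → t < n' →
      pvAland n' ms locs t =
        (List.range ms.length).map (fun i => locs.getD ((t + i) % n') 0 + pvClassSum ms n' i) := by
  intro ms
  induction ms with
  | nil => intro locs t _ _; simp [pvAland]
  | cons m ms ih =>
    intro locs t hlen ht
    rw [pvAland]
    rw [List.length_cons, List.range_succ_eq_map, List.map_cons, List.map_map]
    refine List.cons_eq_cons.mpr ⟨?_, ?_⟩
    · rw [Nat.add_zero, Nat.mod_eq_of_lt ht, pvClassSum_lt (show 0 < n' by omega)]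
      simp
    · rw [ih _ ((t + 1) % n') (by simp [hlen]) (Nat.mod_lt _ (by omega))]
      apply List.map_congr_left
      intro i hi
      simp only [Function.comp_apply, Nat.succ_eq_add_one]
      rw [pvClassSum_cons h1]
      have hmm : ((t + 1) % n' + i) % n' = (t + (i + 1)) % n' := by
        rw [Nat.mod_add_mod]; ring_nf
      rw [hmm]
      by_cases hz : (i + 1) % n' = 0
      · have hr : (t + (i + 1)) % n' = t := by
          obtain ⟨k, hk⟩ := Nat.dvd_iff_mod_eq_zero.mpr hz
          rw [hk, Nat.add_mul_mod_self_left, Nat.mod_eq_of_lt ht]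
        rw [hr]
        have hset : (locs.set t (locs.getD t 0 + m)).getD t 0 = locs.getD t 0 + m := by
          rw [List.getD_eq_getElem?_getD, List.getElem?_set_self (by simpa [hlen] using ht)]
          rfl
        rw [hset]
        simp [hz]
        ring
      · have hr : (t + (i + 1)) % n' ≠ t := by
          intro hc
          apply hz
          have h2 := Nat.add_mod t (i + 1) n'
          rw [hc, Nat.mod_eq_of_lt ht] at h2
          have hrlt : (i + 1) % n' < n' := Nat.mod_lt _ (by omega)
          by_cases hsm : t + (i + 1) % n' < n'
          · rw [Nat.mod_eq_of_lt (by omega)] at h2; omega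
          · rw [Nat.mod_eq_sub_mod (by omega), Nat.mod_eq_of_lt (by omega)] at h2; omega
        rw [List.getD_eq_getElem?_getD, List.getElem?_set_ne (by omega), ← List.getD_eq_getElem?_getD]
        simp [hz]

def pvStridedSum (ms : List Int) (n' : Nat) : Nat → Nat → Int
  | p, 0 => ms.getD p 0
  | p, q + 1 => ms.getD p 0 + pvStridedSum ms n' (p + n') q

lemma pvStridedSum_succ (ms : List Int) (n' : Nat) :
    ∀ q p, pvStridedSum ms n' p (q + 1) = pvStridedSum ms n' p q + ms.getD (p + (q + 1) * n') 0 := by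
  intro q
  induction q with
  | zero => intro p; simp [pvStridedSum]
  | succ q ih =>
    intro p
    rw [pvStridedSum, ih (p + n'), pvStridedSum]
    have : p + n' + (q + 1) * n' = p + (q + 1 + 1) * n' := by ring
    rw [this]
    ring

lemma pvStridedSum_eq_classSum {ms : List Int} {n' p : Nat} (h1 : 1 ≤ n') (hp : p < n') :
    ∀ q, pvStridedSum ms n' p q = pvClassSum ms n' (p + q * n') := by
  intro q
  induction q with
  | zero => rw [pvStridedSum, Nat.zero_mul, Nat.add_zero, pvClassSum_lt hp]
  | succ q ih =>
    rw [pvStridedSum_succ, ih]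
    conv_rhs => rw [pvClassSum_ge h1 (show n' ≤ p + (q + 1) * n' by nlinarith)]
    have : p + (q + 1) * n' - n' = p + q * n' := by
      have : (q + 1) * n' = q * n' + n' := by ring
      omega
    rw [this]


lemma pvCumWalk_getD {ms : List Int} {n : Int} (hn : 1 ≤ n) :
    ∀ (fuel q p : Nat) (pos : Int), q < fuel → p + q * n.toNat < ms.length →
      (pvCumWalk ms n pos (p : Int) fuel).getD q 0 = pos + pvStridedSum ms n.toNat p q := by
  intro fuel
  induction fuel with
  | zero => intro q p pos hq _; omega
  | succ fuel ih =>
    intro q p pos hq hlen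
    rw [pvCumWalk]
    have hplen : p < ms.length := by nlinarith [Int.toNat_of_nonneg (show (0:Int) ≤ n by omega)]
    rw [if_pos (by exact_mod_cast hplen)]
    have hget : PySem.List.pyGetD ms (p : Int) 0 = ms.getD p 0 := by
      simp [PySem.List.pyGetD_natCast]
    cases q with
    | zero => simp [hget, pvStridedSum]
    | succ q =>
      rw [List.getD_cons_succ]
      have hcast : (p : Int) + n = ((p + n.toNat : Nat) : Int) := by
        push_cast [Int.toNat_of_nonneg (show (0:Int) ≤ n by omega)]; ring
      rw [hget, hcast, ih q (p + n.toNat) _ (by omega) (by nlinarith)]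
      rw [pvStridedSum]
      ring
lemma pvInc_get? (c : Char) : pvIncDict.get? c =
    if c = '>' then some 1 else if c = '<' then some (-1)
    else if c = 'v' then some 1000000 else if c = '^' then some (-1000000) else none := by
  have h : pvIncDict = PySem.Dict.mk [('>', 1), ('<', -1), ('v', 1000000), ('^', -1000000)] := by decide
  rw [h]
  simp only [PySem.Dict.get?_mk_cons, beq_iff_eq]
  have hemp : ∀ x, (PySem.Dict.mk ([] : List (Char × Int))).get? x = none := by
    intro x; rfl
  rw [hemp]
  split_ifs with h1 h2 h3 h4 <;> simp_all [eq_comm]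
lemma pvInc_getD_ne_zero (c : Char) :
    pvIncDict.getD c 0 ≠ 0 ↔ pvIncDict.contains c = true := by
  rw [PySem.Dict.getD_eq_get?_getD, PySem.Dict.contains_eq_isSome_get?, pvInc_get? c]
  split_ifs <;> simp
lemma pvInc_not_contains {c : Char} (h : c ≠ '>' ∧ c ≠ '<' ∧ c ≠ 'v' ∧ c ≠ '^') :
    pvIncDict.contains c = false := by
  rw [PySem.Dict.contains_eq_isSome_get?, pvInc_get? c]
  simp [h.1, h.2.1, h.2.2.1, h.2.2.2]

def pvStepM (numPlayers : Int) (st : List Int × PySem.Dict Int Int × Int) (m : Int) :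
    List Int × PySem.Dict Int Int × Int :=
  (PySem.List.pySetD st.1 st.2.2 (PySem.List.pyGetD st.1 st.2.2 0 + m),
   (st.2.1).modify (PySem.List.pyGetD st.1 st.2.2 0 + m) 0 (· + 1),
   PySem.Int.mod (st.2.2 + 1) numPlayers)

def pvCnt (d : PySem.Dict Int Int) (x : Int) : PySem.Dict Int Int := d.modify x 0 (· + 1)

lemma pvFoldA_eq_foldM (n : Int) :
    ∀ (chars : List Char) (st : List Int × PySem.Dict Int Int × Int),
      chars.foldl (fun st c => pvStepA n st c) st =
        ((chars.filter (fun c => pvIncDict.contains c)).map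
          (fun c => (pvIncDict.get? c).getD 0)).foldl (pvStepM n) st := by
  intro chars
  induction chars with
  | nil => intro st; simp
  | cons c cs ih =>
    intro st
    by_cases hc : pvIncDict.contains c = true
    · have hne : pvIncDict.getD c 0 ≠ 0 := (pvInc_getD_ne_zero c).mpr hc
      rw [List.foldl_cons, List.filter_cons_of_pos hc, List.map_cons, List.foldl_cons, ih]
      congr 1
      rw [pvStepA, if_pos hne, pvStepM, PySem.Dict.getD_eq_get?_getD]
    · have heq : pvIncDict.getD c 0 = 0 := by
        by_contra hne
        exact hc ((pvInc_getD_ne_zero c).mp hne)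
      rw [List.foldl_cons, List.filter_cons_of_neg (by simp [hc]), ih]
      congr 1
      rw [pvStepA, if_neg (by simp [heq])]

lemma pvFoldM_dict {n : Int} (hn : 1 ≤ n) :
    ∀ (ms locs : List Int) (d : PySem.Dict Int Int) (t : Nat),
      (ms.foldl (pvStepM n) (locs, d, ((t : Nat) : Int))).2.1 =
        (pvAland n.toNat ms locs t).foldl pvCnt d := by
  intro ms
  induction ms with
  | nil => intro locs d t; simp [pvAland]
  | cons m ms ih =>
    intro locs d t
    rw [List.foldl_cons, pvAland, List.foldl_cons]
    have hget : PySem.List.pyGetD locs ((t : Nat) : Int) 0 = locs.getD t 0 := by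
      simp [PySem.List.pyGetD_natCast]
    have hset : PySem.List.pySetD locs ((t : Nat) : Int) (locs.getD t 0 + m) =
        locs.set t (locs.getD t 0 + m) := by
      simp [PySem.List.pySetD_natCast]
    have hmod : PySem.Int.mod (((t : Nat) : Int) + 1) n = (((t + 1) % n.toNat : Nat) : Int) := by
      rw [PySem.Int.mod_eq_emod_of_pos (by omega)]
      conv_lhs => rw [show n = ((n.toNat : Nat) : Int) from (Int.toNat_of_nonneg (by omega)).symm]
      push_cast
      rfl
    rw [pvStepM]
    simp only [hget, hset, hmod]
    exact ih (locs.set t (locs.getD t 0 + m)) (pvCnt d (locs.getD t 0 + m)) ((t + 1) % n.toNat)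


lemma pvMain (s : String) (n : Int) (hpre : Pre_createPresentMap s n) :
    createPresentMap s n = createPresentMap_alt s n := by
  have hA : createPresentMap s n =
      ((PySem.List.enumerate s.toList 0).foldl (fun st p => pvStepA n st p.2)
        (PySem.List.pyRepeat [0] n, PySem.Dict.insert PySem.Dict.empty 0 n, (0 : Int))).2.1.items := rfl
  have hEnum : (PySem.List.enumerate s.toList 0).foldl (fun st p => pvStepA n st p.2)
        (PySem.List.pyRepeat [0] n, PySem.Dict.insert PySem.Dict.empty 0 n, (0 : Int)) =
      s.toList.foldl (fun st c => pvStepA n st c)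
        (PySem.List.pyRepeat [0] n, PySem.Dict.insert PySem.Dict.empty 0 n, (0 : Int)) := by
    conv_rhs => rw [← PySem.List.map_snd_enumerate (xs := s.toList) (s := 0)]
    rw [List.foldl_map]
  rw [hA, hEnum, pvFoldA_eq_foldM]
  set ms : List Int := ((s.toList.filter (fun c => pvIncDict.contains c)).map
    (fun c => (pvIncDict.get? c).getD 0)) with hms
  by_cases hn : 1 ≤ n
  · -- the real walk: both sides count the same landing sequence
    have hn0 : 0 < n.toNat := by omega
    have hncast : ((n.toNat : Nat) : Int) = n := Int.toNat_of_nonneg (by omega)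
    -- A side
    rw [PySem.List.pyRepeat_singleton]
    have hdict := pvFoldM_dict (n := n) hn ms (List.replicate n.toNat 0)
      (PySem.Dict.insert PySem.Dict.empty 0 n) 0
    simp only [Nat.cast_zero] at hdict
    rw [hdict, pvAland_eq (by omega) ms _ 0 (by simp) hn0]
    have hrep : ∀ k : Nat, (List.replicate n.toNat (0 : Int)).getD k 0 = 0 := by
      intro k
      rw [List.getD_eq_getElem?_getD, List.getElem?_replicate]
      split_ifs <;> rfl
    simp only [hrep, zero_add]
    rw [List.foldl_map]
    -- B side
    show _ = createPresentMap_alt s n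
    have hB : createPresentMap_alt s n =
        ((PySem.List.pyRange 0 ((ms.length : Nat) : Int) 1).foldl
          (fun d i =>
            d.modify
              (PySem.List.pyGetD
                (PySem.List.pyGetD
                  ((PySem.List.pyRange 0 n 1).foldl
                    (fun acc p => acc ++ [pvCumWalk ms n 0 p ms.length]) [])
                  (PySem.Int.mod i n) [])
                (PySem.Int.floordiv i n) 0)
              0 (· + 1))
          (PySem.Dict.insert PySem.Dict.empty 0 n)).items := rfl
    rw [hB]
    have htr : (PySem.List.pyRange 0 n 1).foldl
        (fun acc p => acc ++ [pvCumWalk ms n 0 p ms.length]) [] =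
        (List.range n.toNat).map (fun k => pvCumWalk ms n 0 ((k : Nat) : Int) ms.length) := by
      rw [PySem.List.foldl_append_singleton_eq_map, List.nil_append, PySem.List.pyRange_one]
      rw [List.map_map]
      simp
    rw [htr]
    have hrange : PySem.List.pyRange 0 ((ms.length : Nat) : Int) 1 =
        (List.range ms.length).map (fun i => ((i : Nat) : Int)) := by
      rw [PySem.List.pyRange_one]
      simp
    rw [hrange, List.foldl_map]
    congr 1
    apply PySem.List.foldl_congr_mem
    intro d i hi
    have hilen : i < ms.length := List.mem_range.mp hi
    -- resolve the two integer index computations to Nat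
    have hmodc : PySem.Int.mod ((i : Nat) : Int) n = (((i % n.toNat : Nat)) : Int) := by
      conv_lhs => rw [← hncast]
      exact PySem.Int.mod_natCast i n.toNat
    have hdivc : PySem.Int.floordiv ((i : Nat) : Int) n = (((i / n.toNat : Nat)) : Int) := by
      conv_lhs => rw [← hncast]
      exact PySem.Int.floordiv_natCast i n.toNat
    rw [hmodc, hdivc]
    rw [PySem.List.pyGetD_natCast, PySem.List.pyGetD_natCast]
    have hmlt : i % n.toNat < n.toNat := Nat.mod_lt _ hn0
    rw [PySem.List.getD_map_range]
    · rw [pvCumWalk_getD hn ms.length (i / n.toNat) (i % n.toNat) 0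
        (lt_of_le_of_lt (Nat.div_le_self _ _) hilen)
        (by rw [Nat.mod_add_div']; exact hilen)]
      rw [pvStridedSum_eq_classSum (by omega) hmlt, Nat.mod_add_div', zero_add]
      rfl
    · exact hmlt
  · -- numPlayers < 1: Pre_ says there are no move characters, so nothing happens
    have hall : ∀ c ∈ s.toList, c ≠ '>' ∧ c ≠ '<' ∧ c ≠ 'v' ∧ c ≠ '^' := by
      rcases hpre with h | h
      · omega
      · exact h
    have hmsnil : ms = [] := by
      rw [hms]
      have : s.toList.filter (fun c => pvIncDict.contains c) = [] := by
        rw [List.filter_eq_nil_iff]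
        intro c hc
        simp [pvInc_not_contains (hall c hc)]
      rw [this, List.map_nil]
    rw [hmsnil, List.foldl_nil]
    have hB : createPresentMap_alt s n =
        ((PySem.List.pyRange 0 ((ms.length : Nat) : Int) 1).foldl
          (fun d i =>
            d.modify
              (PySem.List.pyGetD
                (PySem.List.pyGetD
                  ((PySem.List.pyRange 0 n 1).foldl
                    (fun acc p => acc ++ [pvCumWalk ms n 0 p ms.length]) [])
                  (PySem.Int.mod i n) [])
                (PySem.Int.floordiv i n) 0)
              0 (· + 1))
          (PySem.Dict.insert PySem.Dict.empty 0 n)).items := rfl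
    rw [hB, hmsnil]
    rw [show PySem.List.pyRange 0 (((([] : List Int).length : Nat)) : Int) 1 = [] from
      PySem.List.pyRange_one_eq_nil (by simp)]
    rfl

theorem createPresentMap_spec : Claim_equal_createPresentMap := by
  intro s n _ hpre
  unfold Spec_createPresentMap
  exact pvMain s n hpre
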